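-- pv_equiv track=rewrite | github.com/tmpr/AdventOfCode_2019 | 01_space_equation/solution.py | fuel_cost
-- ===== SOURCE A (Python) =====
-- from math import floor
--
-- def fuel_cost(mass: int, recursive=False) -> int:
--     """
--     Given some mass, calulates its fuel cost. \n
--     If `recursive=True`, recursively returns the
--     sum of the fuel costs of the fuel needed.
--     """
--     if recursive:
--         needed_fuel = floor(mass/3) - 2
--         if needed_fuel <= 0:
--             return 0
--         else:
--             return (needed_fuel +
--                    fuel_cost(needed_fuel, recursive=True))
--     else:
--         return floor(mass/3) - 2
-- ===== SOURCE B (Python) =====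
-- from math import floor
--
-- def fuel_cost(mass: int, recursive=False) -> int:
--     """
--     Given some mass, calculates its fuel cost.
--     If `recursive=True`, sums the fuel costs of the fuel needed, iteratively.
--     """
--     if not recursive:
--         return floor(mass/3) - 2
--     total = 0
--     m = mass
--     while True:
--         needed = floor(m/3) - 2
--         if needed <= 0:
--             return total
--         total += needed
--         m = needed
-- ===== Notes on version B (the rewrite author's own statement) =====
-- stated objective: alternative
-- what changed: The recursive branch's self-recursion is replaced by an iterative accumulator loop that repeatedly computes the next fuel amount and sums it until it is non-positive.
import Mathlib
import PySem

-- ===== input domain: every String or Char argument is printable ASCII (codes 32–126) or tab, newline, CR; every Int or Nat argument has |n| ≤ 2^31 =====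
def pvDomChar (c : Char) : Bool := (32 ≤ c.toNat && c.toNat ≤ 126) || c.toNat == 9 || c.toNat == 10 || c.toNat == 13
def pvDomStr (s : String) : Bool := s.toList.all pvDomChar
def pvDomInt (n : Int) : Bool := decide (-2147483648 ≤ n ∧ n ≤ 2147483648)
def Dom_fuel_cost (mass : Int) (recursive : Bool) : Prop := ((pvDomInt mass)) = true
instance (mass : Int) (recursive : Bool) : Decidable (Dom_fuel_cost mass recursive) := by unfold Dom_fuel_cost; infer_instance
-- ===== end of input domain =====

-- B replaces A's self-recursion in the recursive branch by an iterative accumulator loop; same values, constant stack.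
-- On |mass| ≤ 2^31, Python's floor(mass/3) equals integer floor division mass // 3 (float error is far below 1/3), ported as PySem.Int.floordiv.

-- termination helper for both ports (named here so decreasing_by can cite it)
theorem pv_needed_lt (m : Int) (h : ¬ PySem.Int.floordiv m 3 - 2 ≤ 0) :
    (PySem.Int.floordiv m 3 - 2).toNat < m.toNat := by
  rw [PySem.Int.floordiv_eq_ediv_of_pos (by norm_num : (0:Int) < 3)] at *
  omega

-- ===== PORT A =====
def fuel_cost (mass : Int) (recursive : Bool) : Int :=
  if recursive then
    let needed_fuel := PySem.Int.floordiv mass 3 - 2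
    if needed_fuel ≤ 0 then 0
    else needed_fuel + fuel_cost needed_fuel true
  else PySem.Int.floordiv mass 3 - 2
termination_by mass.toNat
decreasing_by exact pv_needed_lt _ (by assumption)

-- ===== PORT B =====
-- the while-loop of Source B: state (total, m)
def fuelLoop (total m : Int) : Int :=
  let needed := PySem.Int.floordiv m 3 - 2
  if needed ≤ 0 then total
  else fuelLoop (total + needed) needed
termination_by m.toNat
decreasing_by exact pv_needed_lt _ (by assumption)

def fuel_cost_alt (mass : Int) (recursive : Bool) : Int :=
  if recursive then fuelLoop 0 mass
  else PySem.Int.floordiv mass 3 - 2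

-- ===== PRECONDITION & SPEC =====
def Spec_fuel_cost (mass : Int) (recursive : Bool) (out : Int) : Prop := out = fuel_cost_alt mass recursive
instance (mass : Int) (recursive : Bool) (out : Int) : Decidable (Spec_fuel_cost mass recursive out) := by unfold Spec_fuel_cost; infer_instance

-- ===== CLAIM (what is proved, stated in full; the proofs are below) =====
def Claim_equal_fuel_cost : Prop := ∀ (mass : Int) (recursive : Bool), Dom_fuel_cost mass recursive → Spec_fuel_cost mass recursive (fuel_cost mass recursive)

-- ===== LEMMAS AND PROOFS =====
-- loop invariant: fuelLoop total m = total + (A's recursive fuel for m)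
theorem fuelLoop_eq (total m : Int) : fuelLoop total m = total + fuel_cost m true := by
  rw [fuelLoop.eq_def, fuel_cost.eq_def]
  by_cases h : PySem.Int.floordiv m 3 - 2 ≤ 0
  · rw [PySem.Int.floordiv_eq_ediv_of_pos (by norm_num : (0:Int) < 3)] at h
    simp [show m / 3 ≤ 2 by omega]
  · simp only [if_neg h, if_true]
    rw [fuelLoop_eq]
    ring
termination_by m.toNat
decreasing_by exact pv_needed_lt _ h

-- ===== VERDICT (by name: the statement is the Claim_ definition above) =====
theorem fuel_cost_spec : Claim_equal_fuel_cost := by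
  intro mass recursive _
  unfold Spec_fuel_cost fuel_cost_alt
  cases recursive with
  | false => rw [fuel_cost.eq_def]; simp
  | true => rw [fuelLoop_eq]; simp
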